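-- pv_equiv track=rewrite | github.com/CWRU-VTOL/MotorDatabase | scripts/data_processing/generic_tools/process_preliminary_csv.py | copy_correct_columns
-- ===== SOURCE A (Python) =====
-- def copy_correct_columns(input_data, template_header):
--     """
--     Copies corresponding columns in input_data into the correct template formatted output.
--
--     Args:
--         input_data (list[list[str]]): Input data as a list of lists of strings, where the first row is the header.
--         template_header (list[list[str]]): List of column headers for the template, only first row considered.
--
--     Returns:
--         list[list[str]]: Output data with columns arranged and matched to the template format.
--     """
--     # Initialize output data with the template header
--     output_data = template_header
--
--     # Pre-create empty rows in output_data for all rows in input_data (excluding header)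
--     for _ in range(len(input_data) - 1):
--         output_data.append([""] * len(template_header[0]))  # Add empty rows with the correct number of columns
--
--
--     for input_header_item_idx in range(len(input_data[0])): # iterate thru each header of input data
--         for template_header_item_idx in range(len(template_header[0])): # iterate thru each header of the template
--             if (input_data[0][input_header_item_idx]==template_header[0][template_header_item_idx]): # if the template header matches the input data header exactly
--                 input_col = [row[input_header_item_idx] for row in input_data[0:]]
--                 for data_item_idx in range(len(input_col)): #copy the column
--                     if(input_col[data_item_idx].strip()): #if item is not empty
--                         output_data[data_item_idx][template_header_item_idx] = input_col[data_item_idx] #copy it to output data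
--     return output_data
-- ===== SOURCE B (Python) =====
-- def copy_correct_columns(input_data, template_header):
--     """Row-major re-implementation: precompute, once, for every template column the
--     ordered list of input columns whose header name matches it, then fill the output
--     grid one row at a time, each cell taking the last non-blank matching value.
--     Like the original, extends/overwrites template_header in place and returns it."""
--     header = template_header[0]
--     matches = [[ic for ic in range(len(input_data[0])) if input_data[0][ic] == header[tc]]
--                for tc in range(len(header))]
--     output_data = template_header
--     for _ in range(len(input_data) - 1):
--         output_data.append([""] * len(header))
--     for r in range(len(input_data)):
--         row = input_data[r]
--         out_row = output_data[r]
--         for tc in range(len(matches)):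
--             for ic in matches[tc]:
--                 if row[ic].strip():
--                     out_row[tc] = row[ic]
--     return output_data
-- ===== Notes on version B (the rewrite author's own statement) =====
-- stated objective: alternative
-- what changed: A works column-major: for every (input column, template column) header pair it re-extracts the whole input column and patches cells into the grid; B precomputes one header-name match table (template column -> ordered matching input columns) and then fills the grid purely row by row, each cell taking the last non-blank matching value.
-- outside the precondition, e.g. on copy_correct_columns([[]], []): A returns [], B raises IndexError
import Mathlib
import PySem

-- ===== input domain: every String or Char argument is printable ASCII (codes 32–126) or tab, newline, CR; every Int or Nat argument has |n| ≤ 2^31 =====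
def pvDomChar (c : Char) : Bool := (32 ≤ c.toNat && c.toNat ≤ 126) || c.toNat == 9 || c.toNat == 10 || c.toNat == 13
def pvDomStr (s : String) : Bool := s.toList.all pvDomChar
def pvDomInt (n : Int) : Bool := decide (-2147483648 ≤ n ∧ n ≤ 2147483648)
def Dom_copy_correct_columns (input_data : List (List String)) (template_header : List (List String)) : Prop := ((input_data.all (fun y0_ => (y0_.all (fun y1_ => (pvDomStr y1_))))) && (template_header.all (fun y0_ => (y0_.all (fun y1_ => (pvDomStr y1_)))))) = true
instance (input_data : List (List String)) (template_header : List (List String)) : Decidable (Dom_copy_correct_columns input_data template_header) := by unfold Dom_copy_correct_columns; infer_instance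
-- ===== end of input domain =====

-- B fills the grid row by row from a precomputed header-match table instead of A's column-major
-- cell patching.  Both Pythons mutate template_header in place the same way (append data rows,
-- overwrite matched cells); the theorems below are about the return value.

-- ===== PORT A =====
-- list indexing row[i] / getD and List.set: indices are in range on Pre_-admitted inputs;
-- out of range Python raises IndexError (excluded by Pre_), the port's getD/set defaults are unreachable there.
def copy_correct_columns (input_data : List (List String)) (template_header : List (List String)) : List (List String) :=
  let w := (template_header.headD []).length
  -- output_data = template_header; then append len(input_data)-1 empty rows [""]*w
  let od0 := template_header ++ List.replicate (input_data.length - 1) (List.replicate w "")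
  let hrow := input_data.headD []
  (List.range hrow.length).foldl (fun od ic =>
    (List.range w).foldl (fun od tc =>
      if hrow.getD ic "" = (template_header.headD []).getD tc "" then
        let input_col := input_data.map (fun row => row.getD ic "")
        (List.range input_col.length).foldl (fun od r =>
          if PySem.Str.strip (input_col.getD r "") ≠ "" then
            od.set r ((od.getD r []).set tc (input_col.getD r ""))
          else od) od
      else od) od) od0

-- ===== PORT B =====
def copy_correct_columns_alt (input_data : List (List String)) (template_header : List (List String)) : List (List String) :=
  let header := template_header.headD []
  let match_table := header.map (fun hh =>
    (List.range (input_data.headD []).length).filter (fun ic => (input_data.headD []).getD ic "" = hh))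
  let output_data := template_header ++ List.replicate (input_data.length - 1) (List.replicate header.length "")
  (List.range input_data.length).foldl (fun od r =>
    od.set r ((List.range match_table.length).foldl (fun out_row tc =>
      (match_table.getD tc []).foldl (fun out_row ic =>
        if PySem.Str.strip ((input_data.getD r []).getD ic "") ≠ "" then
          out_row.set tc ((input_data.getD r []).getD ic "")
        else out_row) out_row) (od.getD r []))) output_data

-- ===== PRECONDITION & SPEC =====
-- Pre_ excludes exactly the inputs where Python A raises IndexError: empty input_data, empty
-- template_header, a matched input column some input row is too short for, or a matched template
-- column that carries a non-blank value into an extra template row too short for it.  The one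
-- excluded input on which A still returns is the degenerate ([[]], []) (empty header rows on both
-- sides), where A returns [] untouched — see the cite in claim.json.
def Pre_copy_correct_columns (input_data : List (List String)) (template_header : List (List String)) : Prop :=
  input_data ≠ [] ∧ template_header ≠ [] ∧
  ∀ ic ∈ List.range (input_data.headD []).length,
    ∀ tc ∈ List.range (template_header.headD []).length,
      (input_data.headD []).getD ic "" = (template_header.headD []).getD tc "" →
        (∀ row ∈ input_data, ic < row.length) ∧
        (∀ r ∈ List.range (min input_data.length template_header.length), r ≠ 0 →
           PySem.Str.strip ((input_data.getD r []).getD ic "") ≠ "" →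
           tc < (template_header.getD r []).length)
instance (input_data : List (List String)) (template_header : List (List String)) : Decidable (Pre_copy_correct_columns input_data template_header) := by unfold Pre_copy_correct_columns; infer_instance
def pvWitness_copy_correct_columns : List (List String) × List (List String) :=
  ([["a", "b"], ["1", " "]], [["b", "c"]])

def Spec_copy_correct_columns (input_data : List (List String)) (template_header : List (List String)) (out : List (List String)) : Prop := out = copy_correct_columns_alt input_data template_header
instance (input_data : List (List String)) (template_header : List (List String)) (out : List (List String)) : Decidable (Spec_copy_correct_columns input_data template_header out) := by unfold Spec_copy_correct_columns; infer_instance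

-- ===== CLAIM (what is proved, stated in full; the proofs are below) =====
def Claim_equal_copy_correct_columns : Prop := ∀ (input_data : List (List String)) (template_header : List (List String)), Dom_copy_correct_columns input_data template_header → Pre_copy_correct_columns input_data template_header → Spec_copy_correct_columns input_data template_header (copy_correct_columns input_data template_header)

-- ===== LEMMAS AND PROOFS =====
-- a fold whose every step preserves length preserves length
theorem pv_foldl_length {a b : Type} (L : List b) (f : List a -> b -> List a)
    (h : forall acc x, (f acc x).length = acc.length) :
    forall acc : List a, (L.foldl f acc).length = acc.length := by
  induction L with
  | nil => intro acc; rfl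
  | cons x xs ih => intro acc; rw [List.foldl_cons, ih, h]

-- a fold all of whose steps fix the start value returns it
theorem pv_foldl_fix {a b : Type} (L : List b) (f : a -> b -> a) (z : a)
    (h : forall x, x ∈ L -> f z x = z) : L.foldl f z = z := by
  induction L with
  | nil => rfl
  | cons x xs ih =>
      rw [List.foldl_cons, h x (by simp)]
      exact ih (fun y hy => h y (by simp [hy]))

theorem pv_mapIdx_id {a : Type} (l : List a) : (l.mapIdx fun _ x => x) = l := by
  apply List.ext_getElem <;> simp

theorem pv_mapIdx_mapIdx {a : Type} (l : List a) (f g : Nat -> a -> a) :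
    (l.mapIdx f).mapIdx g = l.mapIdx (fun i x => g i (f i x)) := by
  apply List.ext_getElem <;> simp

theorem pv_mapIdx_congr {a : Type} (l : List a) (f g : Nat -> a -> a)
    (h : forall i, i < l.length -> forall x, f i x = g i x) : l.mapIdx f = l.mapIdx g := by
  apply List.ext_getElem
  · simp
  · intro i h1 h2
    simp only [List.getElem_mapIdx]
    exact h i (by simpa using h1) _


-- the value A copies for input column ic, data row r (the port's input_col.getD r "")
def pvV (input_data : List (List String)) (ic r : Nat) : String :=
  (input_data.map (fun row => row.getD ic "")).getD r ""

theorem pvV_lt (input_data : List (List String)) (ic r : Nat) (h : r < input_data.length) :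
    pvV input_data ic r = (input_data.getD r []).getD ic "" := by
  unfold pvV
  rw [List.getD_eq_getElem _ "" (by simpa using h), List.getElem_map,
      List.getD_eq_getElem _ [] h]

-- the effect of one (ic, template-row) pass of A on one output row
def pvRowStep (input_data : List (List String)) (hrow h : List String) (r : Nat)
    (acc : List String) (ic : Nat) : List String :=
  (List.range h.length).foldl (fun acc tc =>
    if hrow.getD ic "" = h.getD tc "" then
      (if PySem.Str.strip (pvV input_data ic r) ≠ "" then acc.set tc (pvV input_data ic r) else acc)
    else acc) acc

def pvArow (input_data : List (List String)) (hrow h : List String) (r : Nat)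
    (acc : List String) : List String :=
  (List.range hrow.length).foldl (pvRowStep input_data hrow h r) acc

theorem pvRowStep_length (input_data : List (List String)) (hrow h : List String) (r : Nat)
    (acc : List String) (ic : Nat) : (pvRowStep input_data hrow h r acc ic).length = acc.length := by
  unfold pvRowStep
  apply pv_foldl_length
  intro acc tc
  split_ifs <;> simp


-- A's innermost loop (one matched column copy) is a mapIdx over the rows
theorem pv_rfold_mapIdx (tc : Nat) (p : Nat -> Prop) [DecidablePred p] (v : Nat -> String)
    (od : List (List String)) :
    forall k, k ≤ od.length ->
      ((List.range k).foldl (fun od r =>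
          if p r then od.set r ((od.getD r []).set tc (v r)) else od) od)
      = od.mapIdx (fun r row => if r < k ∧ p r then row.set tc (v r) else row) := by
  intro k
  induction k with
  | zero =>
      intro _
      simp only [List.range_zero, List.foldl_nil]
      rw [show (fun (r : Nat) (row : List String) => if r < 0 ∧ p r then row.set tc (v r) else row)
            = fun _ row => row from by funext r row; simp]
      exact (pv_mapIdx_id od).symm
  | succ k ih =>
      intro hk
      have hk' : k ≤ od.length := Nat.le_of_succ_le hk
      have hklt : k < od.length := hk
      rw [List.range_succ, List.foldl_append, List.foldl_cons, List.foldl_nil, ih hk']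
      set X := od.mapIdx (fun r row => if r < k ∧ p r then row.set tc (v r) else row) with hX
      have hXlen : X.length = od.length := by simp [hX]
      have hXk : X.getD k [] = od[k] := by
        rw [List.getD_eq_getElem X [] (by omega)]
        simp [hX, List.getElem_mapIdx]
      by_cases hp : p k
      · rw [if_pos hp]
        apply List.ext_getElem
        · simp [hXlen]
        · intro i hi1 hi2
          have hio : i < od.length := by
            have h' := hi1
            simp only [List.length_set, hXlen] at h'
            exact h'
          rw [List.getElem_set]
          by_cases hik : k = i
          · subst hik
            rw [if_pos rfl, hXk]
            have hc : k < k + 1 ∧ p k := ⟨Nat.lt_succ_self k, hp⟩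
            simp only [List.getElem_mapIdx, if_pos hc]
          · rw [if_neg hik]
            simp only [hX, List.getElem_mapIdx]
            by_cases hpi : p i
            · by_cases hlt : i < k
              · have hc1 : i < k ∧ p i := ⟨hlt, hpi⟩
                have hc2 : i < k + 1 ∧ p i := ⟨Nat.lt_succ_of_lt hlt, hpi⟩
                rw [if_pos hc1, if_pos hc2]
              · have hc1 : ¬ (i < k ∧ p i) := by tauto
                have hc2 : ¬ (i < k + 1 ∧ p i) := by
                  rintro ⟨hl, -⟩
                  have : i = k := by omega
                  exact hik this.symm
                rw [if_neg hc1, if_neg hc2]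
            · rw [if_neg (by tauto), if_neg (by tauto)]
      · rw [if_neg hp]
        apply pv_mapIdx_congr
        intro i hi x
        by_cases hpi : p i
        · by_cases hlt : i < k
          · have hc1 : i < k ∧ p i := ⟨hlt, hpi⟩
            have hc2 : i < k + 1 ∧ p i := ⟨Nat.lt_succ_of_lt hlt, hpi⟩
            rw [if_pos hc1, if_pos hc2]
          · have hc1 : ¬ (i < k ∧ p i) := by tauto
            have hc2 : ¬ (i < k + 1 ∧ p i) := by
              rintro ⟨hl, -⟩
              have : i = k := by omega
              subst this
              exact hp hpi
            rw [if_neg hc1, if_neg hc2]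
        · rw [if_neg (by tauto), if_neg (by tauto)]


theorem pv_getD_set (l : List String) (i j : Nat) (v : String) :
    (l.set i v).getD j "" = if i = j ∧ j < l.length then v else l.getD j "" := by
  by_cases hj : j < l.length
  · rw [List.getD_eq_getElem _ "" (by simpa using hj), List.getElem_set]
    by_cases hij : i = j
    · simp [hij, hj]
    · rw [if_neg hij, if_neg (by tauto), List.getD_eq_getElem l "" hj]
  · rw [if_neg (by tauto), List.getD_eq_default _ "" (by simp; omega),
        List.getD_eq_default _ "" (by omega)]


-- cell tc0 after one (ic)-pass over the first k template columns
theorem pv_rowstep_cell_aux (input_data : List (List String)) (hrow h : List String)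
    (ic r tc0 : Nat) :
    forall (k : Nat) (acc : List String), tc0 < acc.length ->
      (((List.range k).foldl (fun acc tc =>
          if hrow.getD ic "" = h.getD tc "" then
            (if PySem.Str.strip (pvV input_data ic r) ≠ "" then acc.set tc (pvV input_data ic r)
             else acc)
          else acc) acc).getD tc0 "")
      = if tc0 < k ∧ hrow.getD ic "" = h.getD tc0 "" then
          (if PySem.Str.strip (pvV input_data ic r) ≠ "" then pvV input_data ic r
           else acc.getD tc0 "")
        else acc.getD tc0 "" := by
  intro k
  induction k with
  | zero => intro acc hacc; simp
  | succ k ih =>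
      intro acc hacc
      rw [List.range_succ, List.foldl_append, List.foldl_cons, List.foldl_nil]
      set Y := (List.range k).foldl (fun acc tc =>
          if hrow.getD ic "" = h.getD tc "" then
            (if PySem.Str.strip (pvV input_data ic r) ≠ "" then acc.set tc (pvV input_data ic r)
             else acc)
          else acc) acc with hY
      have hYlen : Y.length = acc.length := by
        rw [hY]
        apply pv_foldl_length
        intro a tc
        split_ifs <;> simp
      have hcell : Y.getD tc0 ""
          = if tc0 < k ∧ hrow.getD ic "" = h.getD tc0 "" then
              (if PySem.Str.strip (pvV input_data ic r) ≠ "" then pvV input_data ic r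
               else acc.getD tc0 "")
            else acc.getD tc0 "" := by
        rw [hY]; exact ih acc hacc
      clear hY
      clear_value Y
      by_cases hm : hrow.getD ic "" = h.getD k ""
      · rw [if_pos hm]
        by_cases hp : PySem.Str.strip (pvV input_data ic r) ≠ ""
        · rw [if_pos hp, pv_getD_set]
          by_cases hik : k = tc0
          · subst hik
            have hc1 : k = k ∧ k < Y.length := ⟨rfl, by omega⟩
            have hc2 : k < k + 1 ∧ hrow.getD ic "" = h.getD k "" := ⟨Nat.lt_succ_self k, hm⟩
            rw [if_pos hc1, if_pos hc2, if_pos hp]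
          · have hc0 : ¬ (k = tc0 ∧ tc0 < Y.length) := fun hc => hik hc.1
            rw [if_neg hc0, hcell, if_pos hp]
            by_cases hmt : hrow.getD ic "" = h.getD tc0 ""
            · by_cases hlt : tc0 < k
              · have hc1 : tc0 < k ∧ hrow.getD ic "" = h.getD tc0 "" := ⟨hlt, hmt⟩
                have hc2 : tc0 < k + 1 ∧ hrow.getD ic "" = h.getD tc0 "" :=
                  ⟨Nat.lt_succ_of_lt hlt, hmt⟩
                rw [if_pos hc1, if_pos hc2]
              · have hc1 : ¬ (tc0 < k ∧ hrow.getD ic "" = h.getD tc0 "") := fun hc => hlt hc.1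
                have hc2 : ¬ (tc0 < k + 1 ∧ hrow.getD ic "" = h.getD tc0 "") := by
                  rintro ⟨hl, -⟩
                  exact hik (by omega)
                rw [if_neg hc1, if_neg hc2]
            · have hc1 : ¬ (tc0 < k ∧ hrow.getD ic "" = h.getD tc0 "") := fun hc => hmt hc.2
              have hc2 : ¬ (tc0 < k + 1 ∧ hrow.getD ic "" = h.getD tc0 "") := fun hc => hmt hc.2
              rw [if_neg hc1, if_neg hc2]
        · rw [if_neg hp, hcell, if_neg hp]
          simp only [ite_self]
      · rw [if_neg hm, hcell]
        by_cases hp : PySem.Str.strip (pvV input_data ic r) ≠ ""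
        · rw [if_pos hp]
          by_cases hmt : hrow.getD ic "" = h.getD tc0 ""
          · have hik : tc0 ≠ k := by
              intro hc; rw [hc] at hmt; exact hm hmt
            by_cases hlt : tc0 < k
            · have hc1 : tc0 < k ∧ hrow.getD ic "" = h.getD tc0 "" := ⟨hlt, hmt⟩
              have hc2 : tc0 < k + 1 ∧ hrow.getD ic "" = h.getD tc0 "" :=
                ⟨Nat.lt_succ_of_lt hlt, hmt⟩
              rw [if_pos hc1, if_pos hc2]
            · have hc1 : ¬ (tc0 < k ∧ hrow.getD ic "" = h.getD tc0 "") := fun hc => hlt hc.1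
              have hc2 : ¬ (tc0 < k + 1 ∧ hrow.getD ic "" = h.getD tc0 "") := by
                rintro ⟨hl, -⟩
                exact hik (by omega)
              rw [if_neg hc1, if_neg hc2]
          · have hc1 : ¬ (tc0 < k ∧ hrow.getD ic "" = h.getD tc0 "") := fun hc => hmt hc.2
            have hc2 : ¬ (tc0 < k + 1 ∧ hrow.getD ic "" = h.getD tc0 "") := fun hc => hmt hc.2
            rw [if_neg hc1, if_neg hc2]
        · rw [if_neg hp]
          simp only [ite_self]


theorem pv_rowstep_cell (input_data : List (List String)) (hrow h : List String)
    (ic r tc0 : Nat) (acc : List String) (hacc : tc0 < acc.length) :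
    (pvRowStep input_data hrow h r acc ic).getD tc0 ""
      = if tc0 < h.length ∧ hrow.getD ic "" = h.getD tc0 "" then
          (if PySem.Str.strip (pvV input_data ic r) ≠ "" then pvV input_data ic r
           else acc.getD tc0 "")
        else acc.getD tc0 "" := by
  unfold pvRowStep
  exact pv_rowstep_cell_aux input_data hrow h ic r tc0 h.length acc hacc

theorem pv_arow_cell (input_data : List (List String)) (hrow h : List String)
    (r tc0 : Nat) :
    forall (L : List Nat) (acc : List String), tc0 < acc.length ->
      ((L.foldl (pvRowStep input_data hrow h r) acc).getD tc0 "")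
      = L.foldl (fun val ic =>
          if tc0 < h.length ∧ hrow.getD ic "" = h.getD tc0 "" then
            (if PySem.Str.strip (pvV input_data ic r) ≠ "" then pvV input_data ic r else val)
          else val) (acc.getD tc0 "") := by
  intro L
  induction L with
  | nil => intro acc hacc; rfl
  | cons ic L ih =>
      intro acc hacc
      rw [List.foldl_cons, List.foldl_cons,
          ih (pvRowStep input_data hrow h r acc ic) (by rw [pvRowStep_length]; exact hacc),
          pv_rowstep_cell input_data hrow h ic r tc0 acc hacc]

theorem pvRowStep_def (input_data : List (List String)) (hrow h : List String)
    (r ic : Nat) (acc : List String) :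
    (List.range h.length).foldl (fun acc tc =>
      if hrow.getD ic "" = h.getD tc "" then
        (if PySem.Str.strip (pvV input_data ic r) ≠ "" then acc.set tc (pvV input_data ic r)
         else acc)
      else acc) acc = pvRowStep input_data hrow h r acc ic := rfl

-- A's template-column pass, acting on a row-capped mapIdx grid, acts row-wise
theorem pv_tcfold (input_data : List (List String)) (hrow h : List String) (ic : Nat)
    (od0 : List (List String)) (hlen : input_data.length ≤ od0.length) :
    forall (L : List Nat) (F : Nat -> List String -> List String),
      (L.foldl (fun od tc =>
        if hrow.getD ic "" = h.getD tc "" then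
          (List.range input_data.length).foldl (fun od r =>
            if PySem.Str.strip (pvV input_data ic r) ≠ "" then
              od.set r ((od.getD r []).set tc (pvV input_data ic r))
            else od) od
        else od)
        (od0.mapIdx (fun r row => if r < input_data.length then F r row else row)))
      = od0.mapIdx (fun r row => if r < input_data.length then
          L.foldl (fun acc tc =>
            if hrow.getD ic "" = h.getD tc "" then
              (if PySem.Str.strip (pvV input_data ic r) ≠ "" then acc.set tc (pvV input_data ic r)
               else acc)
            else acc) (F r row)
          else row) := by
  intro L
  induction L with
  | nil => intro F; rfl
  | cons tc L ih =>
      intro F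
      rw [List.foldl_cons]
      by_cases hm : hrow.getD ic "" = h.getD tc ""
      · rw [if_pos hm]
        have hXlen : input_data.length
            ≤ (od0.mapIdx (fun r row => if r < input_data.length then F r row else row)).length := by
          simpa using hlen
        rw [pv_rfold_mapIdx tc (fun r => PySem.Str.strip (pvV input_data ic r) ≠ "")
              (fun r => pvV input_data ic r) _ input_data.length hXlen]
        rw [pv_mapIdx_mapIdx]
        have hstep : (fun (i : Nat) (x : List String) =>
              if i < input_data.length ∧ PySem.Str.strip (pvV input_data ic i) ≠ "" then
                (if i < input_data.length then F i x else x).set tc (pvV input_data ic i)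
              else (if i < input_data.length then F i x else x))
            = (fun (i : Nat) (x : List String) =>
              if i < input_data.length then
                (if PySem.Str.strip (pvV input_data ic i) ≠ "" then (F i x).set tc (pvV input_data ic i)
                 else F i x)
              else x) := by
          funext i x
          by_cases h1 : i < input_data.length <;>
            by_cases h2 : PySem.Str.strip (pvV input_data ic i) ≠ "" <;>
            simp [h1, h2]
        rw [hstep, ih (fun r row =>
          if PySem.Str.strip (pvV input_data ic r) ≠ "" then (F r row).set tc (pvV input_data ic r)
          else F r row)]
        apply pv_mapIdx_congr
        intro i hi x
        by_cases h1 : i < input_data.length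
        · rw [if_pos h1, if_pos h1, List.foldl_cons, if_pos hm]
        · rw [if_neg h1, if_neg h1]
      · rw [if_neg hm, ih F]
        apply pv_mapIdx_congr
        intro i hi x
        by_cases h1 : i < input_data.length
        · rw [if_pos h1, if_pos h1, List.foldl_cons, if_neg hm]
        · rw [if_neg h1, if_neg h1]

-- A's outer loop over input columns, acting on a row-capped mapIdx grid, acts row-wise
theorem pv_icfold (input_data : List (List String)) (hrow h : List String)
    (od0 : List (List String)) (hlen : input_data.length ≤ od0.length) :
    forall (L : List Nat) (F : Nat -> List String -> List String),
      (L.foldl (fun od ic =>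
        (List.range h.length).foldl (fun od tc =>
          if hrow.getD ic "" = h.getD tc "" then
            (List.range input_data.length).foldl (fun od r =>
              if PySem.Str.strip (pvV input_data ic r) ≠ "" then
                od.set r ((od.getD r []).set tc (pvV input_data ic r))
              else od) od
          else od) od)
        (od0.mapIdx (fun r row => if r < input_data.length then F r row else row)))
      = od0.mapIdx (fun r row => if r < input_data.length then
          L.foldl (pvRowStep input_data hrow h r) (F r row) else row) := by
  intro L
  induction L with
  | nil => intro F; rfl
  | cons ic L ih =>
      intro F
      rw [List.foldl_cons, pv_tcfold input_data hrow h ic od0 hlen (List.range h.length) F]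
      simp only [pvRowStep_def]
      rw [ih (fun r row => pvRowStep input_data hrow h r (F r row) ic)]
      apply pv_mapIdx_congr
      intro i hi x
      by_cases h1 : i < input_data.length
      · rw [if_pos h1, if_pos h1, List.foldl_cons]
      · rw [if_neg h1, if_neg h1]

-- B's row loop (set each row to a function of itself) is a row-capped mapIdx
theorem pv_setfold_mapIdx (g : Nat -> List String -> List String) (od : List (List String)) :
    forall k, k ≤ od.length ->
      ((List.range k).foldl (fun od r => od.set r (g r (od.getD r []))) od)
      = od.mapIdx (fun r row => if r < k then g r row else row) := by
  intro k
  induction k with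
  | zero =>
      intro _
      simp only [List.range_zero, List.foldl_nil]
      rw [show (fun (r : Nat) (row : List String) => if r < 0 then g r row else row)
            = fun _ row => row from by funext r row; simp]
      exact (pv_mapIdx_id od).symm
  | succ k ih =>
      intro hk
      have hk' : k ≤ od.length := Nat.le_of_succ_le hk
      have hklt : k < od.length := hk
      rw [List.range_succ, List.foldl_append, List.foldl_cons, List.foldl_nil, ih hk']
      set X := od.mapIdx (fun r row => if r < k then g r row else row) with hX
      have hXlen : X.length = od.length := by simp [hX]
      have hXk : X.getD k [] = od[k] := by
        rw [List.getD_eq_getElem X [] (by omega)]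
        simp [hX, List.getElem_mapIdx]
      apply List.ext_getElem
      · simp [hXlen]
      · intro i hi1 hi2
        have hio : i < od.length := by
          have h' := hi1
          simp only [List.length_set, hXlen] at h'
          exact h'
        rw [List.getElem_set]
        by_cases hik : k = i
        · subst hik
          rw [if_pos rfl, hXk]
          have hc : k < k + 1 := Nat.lt_succ_self k
          simp only [List.getElem_mapIdx, if_pos hc]
        · rw [if_neg hik]
          simp only [hX, List.getElem_mapIdx]
          by_cases hlt : i < k
          · rw [if_pos hlt, if_pos (Nat.lt_succ_of_lt hlt)]
          · have hc2 : ¬ i < k + 1 := by omega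
            rw [if_neg hlt, if_neg hc2]

-- B's per-row update: the inner matched-column pass and its cell effect
def pvBstep (input_data : List (List String)) (r : Nat) (mt : List (List Nat))
    (acc : List String) (tc : Nat) : List String :=
  (mt.getD tc []).foldl (fun acc ic =>
    if PySem.Str.strip ((input_data.getD r []).getD ic "") ≠ "" then
      acc.set tc ((input_data.getD r []).getD ic "")
    else acc) acc

def pvBrow (input_data : List (List String)) (mt : List (List Nat)) (r : Nat)
    (acc : List String) : List String :=
  (List.range mt.length).foldl (pvBstep input_data r mt) acc

theorem pvBstep_length (input_data : List (List String)) (r : Nat) (mt : List (List Nat))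
    (acc : List String) (tc : Nat) : (pvBstep input_data r mt acc tc).length = acc.length := by
  unfold pvBstep
  apply pv_foldl_length
  intro a ic
  split_ifs <;> simp

theorem pv_bic_cell (input_data : List (List String)) (r tc j : Nat) :
    forall (ics : List Nat) (acc : List String),
      ((ics.foldl (fun acc ic =>
          if PySem.Str.strip ((input_data.getD r []).getD ic "") ≠ "" then
            acc.set tc ((input_data.getD r []).getD ic "")
          else acc) acc).getD j "")
      = if tc = j ∧ j < acc.length then
          ics.foldl (fun val ic =>
            if PySem.Str.strip ((input_data.getD r []).getD ic "") ≠ "" then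
              (input_data.getD r []).getD ic ""
            else val) (acc.getD j "")
        else acc.getD j "" := by
  intro ics
  induction ics with
  | nil => intro acc; split_ifs <;> rfl
  | cons ic ics ih =>
      intro acc
      rw [List.foldl_cons, List.foldl_cons]
      by_cases hp : PySem.Str.strip ((input_data.getD r []).getD ic "") ≠ ""
      · rw [if_pos hp, if_pos hp,
            ih (acc.set tc ((input_data.getD r []).getD ic ""))]
        by_cases hc : tc = j ∧ j < acc.length
        · have hc' : tc = j ∧ j < (acc.set tc ((input_data.getD r []).getD ic "")).length := by
            simpa using hc
          rw [if_pos hc', if_pos hc, pv_getD_set, if_pos ⟨hc.1, hc.2⟩]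
        · have hc' : ¬ (tc = j ∧ j < (acc.set tc ((input_data.getD r []).getD ic "")).length) := by
            simpa using hc
          rw [if_neg hc', if_neg hc, pv_getD_set, if_neg hc]
      · rw [if_neg hp, if_neg hp, ih acc]

theorem pv_btc_cell (input_data : List (List String)) (r : Nat) (mt : List (List Nat))
    (tc0 : Nat) :
    forall (k : Nat) (acc : List String), tc0 < acc.length ->
      (((List.range k).foldl (pvBstep input_data r mt) acc).getD tc0 "")
      = if tc0 < k then
          (mt.getD tc0 []).foldl (fun val ic =>
            if PySem.Str.strip ((input_data.getD r []).getD ic "") ≠ "" then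
              (input_data.getD r []).getD ic ""
            else val) (acc.getD tc0 "")
        else acc.getD tc0 "" := by
  intro k
  induction k with
  | zero => intro acc hacc; simp
  | succ k ih =>
      intro acc hacc
      rw [List.range_succ, List.foldl_append, List.foldl_cons, List.foldl_nil]
      set Y := (List.range k).foldl (pvBstep input_data r mt) acc with hY
      have hYlen : Y.length = acc.length := by
        rw [hY]
        apply pv_foldl_length
        intro a tc
        rw [pvBstep_length]
      have hcell : Y.getD tc0 ""
          = if tc0 < k then
              (mt.getD tc0 []).foldl (fun val ic =>
                if PySem.Str.strip ((input_data.getD r []).getD ic "") ≠ "" then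
                  (input_data.getD r []).getD ic ""
                else val) (acc.getD tc0 "")
            else acc.getD tc0 "" := by
        rw [hY]; exact ih acc hacc
      clear hY
      clear_value Y
      unfold pvBstep
      rw [pv_bic_cell input_data r k tc0 (mt.getD k []) Y]
      by_cases hk : k = tc0
      · subst hk
        rw [if_pos ⟨rfl, by omega⟩, hcell, if_neg (Nat.lt_irrefl k),
            if_pos (Nat.lt_succ_self k)]
      · rw [if_neg (fun hc => hk hc.1), hcell]
        by_cases hlt : tc0 < k
        · rw [if_pos hlt, if_pos (Nat.lt_succ_of_lt hlt)]
        · rw [if_neg hlt, if_neg (by omega)]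

-- one output row of A equals the same row as B builds it, from any starting row
theorem pv_row_eq (input_data : List (List String)) (h : List String) (r : Nat)
    (hr : r < input_data.length) (acc : List String) :
    pvArow input_data (input_data.headD []) h r acc
    = pvBrow input_data
        (h.map (fun hh => (List.range (input_data.headD []).length).filter
          (fun ic => (input_data.headD []).getD ic "" = hh))) r acc := by
  have hlenA : (pvArow input_data (input_data.headD []) h r acc).length = acc.length := by
    unfold pvArow
    exact pv_foldl_length _ _
      (fun a ic => pvRowStep_length input_data (input_data.headD []) h r a ic) acc
  have hlenB : (pvBrow input_data
      (h.map (fun hh => (List.range (input_data.headD []).length).filter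
        (fun ic => (input_data.headD []).getD ic "" = hh))) r acc).length = acc.length := by
    unfold pvBrow
    exact pv_foldl_length _ _ (fun a tc => pvBstep_length input_data r _ a tc) acc
  apply List.ext_getElem
  · rw [hlenA, hlenB]
  · intro i h1 h2
    have hacc : i < acc.length := hlenA ▸ h1
    rw [← List.getD_eq_getElem _ "" h1, ← List.getD_eq_getElem _ "" h2]
    unfold pvArow pvBrow
    rw [pv_arow_cell input_data (input_data.headD []) h r i _ acc hacc,
        pv_btc_cell input_data r _ i _ acc hacc]
    rw [List.length_map]
    by_cases htc : i < h.length
    · rw [if_pos htc]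
      rw [List.getD_eq_getElem (h.map (fun hh =>
            (List.range (input_data.headD []).length).filter
              (fun ic => (input_data.headD []).getD ic "" = hh))) [] (by simpa using htc),
          List.getElem_map]
      rw [← PySem.List.foldl_ite_eq_foldl_filter
            (p := fun ic => (input_data.headD []).getD ic "" = h[i])]
      have hfe : (fun (val : String) (ic : Nat) =>
          if i < h.length ∧ (input_data.headD []).getD ic "" = h.getD i "" then
            (if PySem.Str.strip (pvV input_data ic r) ≠ "" then pvV input_data ic r else val)
          else val)
        = (fun (val : String) (ic : Nat) =>
          if (input_data.headD []).getD ic "" = h[i] then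
            (if PySem.Str.strip ((input_data.getD r []).getD ic "") ≠ ""
             then (input_data.getD r []).getD ic "" else val)
          else val) := by
        funext val ic
        rw [pvV_lt input_data ic r hr, List.getD_eq_getElem h "" htc]
        simp [htc]
      rw [hfe]
    · rw [if_neg htc]
      apply pv_foldl_fix
      intro ic _
      rw [if_neg (fun hc => htc hc.1)]

-- rfl bridges used to fold the ports' raw expressions into the named helpers
theorem pvV_def (input_data : List (List String)) (ic r : Nat) :
    ((input_data.map fun row => row.getD ic "").getD r "") = pvV input_data ic r := rfl

theorem pvArow_def (input_data : List (List String)) (hrow h : List String) (r : Nat)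
    (acc : List String) :
    (List.range hrow.length).foldl (pvRowStep input_data hrow h r) acc
      = pvArow input_data hrow h r acc := rfl

theorem pvBstep_def (input_data : List (List String)) (r : Nat) (mt : List (List Nat)) :
    (fun (acc : List String) (tc : Nat) => (mt.getD tc []).foldl (fun acc ic =>
      if PySem.Str.strip ((input_data.getD r []).getD ic "") ≠ "" then
        acc.set tc ((input_data.getD r []).getD ic "")
      else acc) acc) = pvBstep input_data r mt := rfl

theorem pvBrow_def (input_data : List (List String)) (r : Nat) (hdr : List String)
    (g : String -> List Nat) (acc : List String) :
    (List.range hdr.length).foldl (pvBstep input_data r (hdr.map g)) acc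
      = pvBrow input_data (hdr.map g) r acc := by
  unfold pvBrow
  rw [List.length_map]

-- the central equivalence
theorem pv_main (input_data template_header : List (List String))
    (hne : input_data ≠ []) (hte : template_header ≠ []) :
    copy_correct_columns input_data template_header
      = copy_correct_columns_alt input_data template_header := by
  have hn : 0 < input_data.length := by
    cases input_data with
    | nil => exact absurd rfl hne
    | cons a l => simp
  have ht : 0 < template_header.length := by
    cases template_header with
    | nil => exact absurd rfl hte
    | cons a l => simp
  simp only [copy_correct_columns, copy_correct_columns_alt, List.length_map]
  simp only [pvV_def, pvBstep_def]
  have hlen0 : input_data.length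
      ≤ (template_header ++ List.replicate (input_data.length - 1)
          (List.replicate (template_header.headD []).length "")).length := by
    simp
    omega
  have hid : (template_header ++ List.replicate (input_data.length - 1)
        (List.replicate (template_header.headD []).length ""))
      = (template_header ++ List.replicate (input_data.length - 1)
          (List.replicate (template_header.headD []).length "")).mapIdx
          (fun r row => if r < input_data.length then (fun (_ : Nat) (x : List String) => x) r row
           else row) := by
    rw [show (fun (r : Nat) (row : List String) =>
          if r < input_data.length then (fun (_ : Nat) (x : List String) => x) r row else row)
        = fun _ x => x from by funext r row; simp, pv_mapIdx_id]
  conv_lhs => rw [hid]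
  rw [pv_icfold input_data (input_data.headD []) (template_header.headD []) _ hlen0
      (List.range (input_data.headD []).length) (fun _ x => x)]
  simp only [pvArow_def]
  simp only [pvBrow_def]
  rw [pv_setfold_mapIdx (fun r row => pvBrow input_data
        ((template_header.headD []).map (fun hh =>
          (List.range (input_data.headD []).length).filter
            (fun ic => (input_data.headD []).getD ic "" = hh))) r row)
      _ input_data.length hlen0]
  apply pv_mapIdx_congr
  intro i hi x
  by_cases h1 : i < input_data.length
  · rw [if_pos h1, if_pos h1, pv_row_eq input_data (template_header.headD []) i h1 x]
  · rw [if_neg h1, if_neg h1]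

-- ===== VERDICT (by name: the statement is the Claim_ definition above) =====
theorem copy_correct_columns_spec : Claim_equal_copy_correct_columns := by
  intro input_data template_header _ hPre
  unfold Spec_copy_correct_columns
  exact pv_main input_data template_header hPre.1 hPre.2.1
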